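-- pv_equiv track=rewrite | github.com/glipt-org/Glipt | benchmarks/bench_closures.py | run_counters
-- ===== SOURCE A (Python) =====
-- def make_counter():
--     count = [0]
--     def increment():
--         count[0] = count[0] + 1
--         return count[0]
--     return increment
--
-- def run_counters(n):
--     c1 = make_counter()
--     c2 = make_counter()
--     c3 = make_counter()
--     i = 0
--     while i < n:
--         c1()
--         c2()
--         c3()
--         i = i + 1
--     return c1() + c2() + c3()
-- ===== SOURCE B (Python) =====
-- def run_counters(n):
--     # Each counter is incremented once per loop iteration plus once at return:
--     # closed form, no loop, no closures.
--     return 3 * (max(n, 0) + 1)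
-- ===== Notes on version B (the rewrite author's own statement) =====
-- stated objective: faster
-- what changed: Replaced the n-iteration loop over three closure counters with the closed form 3*(max(n,0)+1).
import Mathlib
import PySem

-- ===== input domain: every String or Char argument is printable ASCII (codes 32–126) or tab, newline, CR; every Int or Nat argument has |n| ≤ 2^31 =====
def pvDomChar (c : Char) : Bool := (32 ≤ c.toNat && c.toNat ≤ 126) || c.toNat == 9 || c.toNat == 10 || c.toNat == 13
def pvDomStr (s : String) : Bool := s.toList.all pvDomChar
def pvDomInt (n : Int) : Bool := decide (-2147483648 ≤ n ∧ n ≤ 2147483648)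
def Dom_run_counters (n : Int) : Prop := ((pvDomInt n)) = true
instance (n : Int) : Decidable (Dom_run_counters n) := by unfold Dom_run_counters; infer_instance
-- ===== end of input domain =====

-- B replaces A's n-iteration loop of three closure counters with the closed form 3*(max(n,0)+1); objective: faster (O(1) vs O(n)).

-- ===== PORT A =====
-- A's while loop: state (i, c1, c2, c3); each iteration increments all three counters.
def run_counters_loop (n i c1 c2 c3 : Int) : Int :=
  if h : i < n then
    run_counters_loop n (i + 1) (c1 + 1) (c2 + 1) (c3 + 1)
  else
    (c1 + 1) + (c2 + 1) + (c3 + 1)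
termination_by (n - i).toNat
decreasing_by omega

def run_counters (n : Int) : Int := run_counters_loop n 0 0 0 0

-- ===== PORT B =====
def run_counters_alt (n : Int) : Int := 3 * (max n 0 + 1)

-- ===== PRECONDITION & SPEC =====
def Spec_run_counters (n : Int) (out : Int) : Prop := out = run_counters_alt n
instance (n : Int) (out : Int) : Decidable (Spec_run_counters n out) := by unfold Spec_run_counters; infer_instance

-- ===== CLAIM (what is proved, stated in full; the proofs are below) =====
def Claim_equal_run_counters : Prop := ∀ (n : Int), Dom_run_counters n → Spec_run_counters n (run_counters n)

-- ===== LEMMAS AND PROOFS =====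
theorem run_counters_loop_eq (n i c1 c2 c3 : Int) :
    run_counters_loop n i c1 c2 c3 = c1 + c2 + c3 + 3 * (max (n - i) 0 + 1) := by
  by_cases h : i < n
  · rw [run_counters_loop, dif_pos h, run_counters_loop_eq n (i + 1)]
    omega
  · rw [run_counters_loop, dif_neg h]
    omega
termination_by (n - i).toNat
decreasing_by omega

-- ===== VERDICT (by name: the statement is the Claim_ definition above) =====
theorem run_counters_spec : Claim_equal_run_counters := by
  intro n _
  unfold Spec_run_counters run_counters run_counters_alt
  rw [run_counters_loop_eq]
  omega
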